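-- pv_equiv track=rewrite | github.com/dzy9821/Asr-1.7B | models/vad/silero_vad_wrapper.py | _flags_to_segments
-- ===== SOURCE A (Python) =====
-- def _flags_to_segments(flags, frame_size, total_samples, min_silence_frames):
--     segments = []
--     in_speech = False
--     start_frame = 0
--     silence_frames = 0
--
--     for i, flag in enumerate(flags):
--         if flag == 1:
--             if not in_speech:
--                 in_speech = True
--                 start_frame = i
--             silence_frames = 0
--             continue
--
--         if not in_speech:
--             continue
--
--         silence_frames += 1
--         if silence_frames < min_silence_frames:
--             continue
--
--         end_frame = i - silence_frames + 1
--         if end_frame > start_frame: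
--             segments.append(
--                 (
--                     start_frame * frame_size,
--                     min(end_frame * frame_size, total_samples),
--                 )
--             )
--         in_speech = False
--         silence_frames = 0
--
--     if in_speech:
--         segments.append((start_frame * frame_size, total_samples))
--
--     return segments
-- ===== SOURCE B (Python) =====
-- def _flags_to_segments(flags, frame_size, total_samples, min_silence_frames):
--     threshold = max(min_silence_frames, 1)
--     # pass 1: group contiguous speech frames, merging across gaps shorter than threshold
--     speech = [i for i, f in enumerate(flags) if f == 1]
--     groups = []
--     for i in speech:
--         if groups and i - groups[-1][1] - 1 < threshold:
--             groups[-1][1] = i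
--         else:
--             groups.append([i, i])
--     # pass 2: emit one segment per group; only the last group may run to total_samples
--     segments = []
--     for k, (first, last) in enumerate(groups):
--         if k < len(groups) - 1 or len(flags) - (last + 1) >= threshold:
--             segments.append((first * frame_size, min((last + 1) * frame_size, total_samples)))
--         else:
--             segments.append((first * frame_size, total_samples))
--     return segments
-- ===== Notes on version B (the rewrite author's own statement) =====
-- stated objective: alternative
-- what changed: Replaces A's single-pass five-variable state machine by two passes: first group contiguous speech frames (merging across silence gaps shorter than max(min_silence_frames,1)), then emit one segment per group, with only the last group eligible to extend to total_samples.
import Mathlib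
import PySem

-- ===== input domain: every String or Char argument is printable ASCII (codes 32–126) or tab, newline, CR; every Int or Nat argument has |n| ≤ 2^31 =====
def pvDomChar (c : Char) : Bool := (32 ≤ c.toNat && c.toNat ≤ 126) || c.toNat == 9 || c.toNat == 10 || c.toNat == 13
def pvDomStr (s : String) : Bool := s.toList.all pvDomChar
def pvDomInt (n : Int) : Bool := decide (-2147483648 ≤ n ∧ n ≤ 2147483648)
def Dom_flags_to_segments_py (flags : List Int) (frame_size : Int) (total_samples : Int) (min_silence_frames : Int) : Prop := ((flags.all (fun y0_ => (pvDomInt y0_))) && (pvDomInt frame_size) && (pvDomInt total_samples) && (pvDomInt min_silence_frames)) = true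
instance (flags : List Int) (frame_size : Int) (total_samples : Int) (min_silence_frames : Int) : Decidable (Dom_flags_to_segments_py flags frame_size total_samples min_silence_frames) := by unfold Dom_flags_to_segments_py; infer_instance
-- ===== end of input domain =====

-- B replaces A's single five-variable state machine by two passes (group contiguous speech,
-- then emit one segment per group); same O(n) cost, objective: alternative decomposition.

-- ===== PORT A =====
-- the enumerate loop of A, as structural recursion carrying the index i and A's state
-- (segments, in_speech, start_frame, silence_frames); branches in A's order
def pvArun (frame_size total_samples min_silence_frames : Int) :
    List Int → Int → List (Int × Int) → Bool → Int → Int → List (Int × Int)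
  | [], _, segments, in_speech, start_frame, _ =>
      if in_speech then segments ++ [(start_frame * frame_size, total_samples)] else segments
  | flag :: rest, i, segments, in_speech, start_frame, silence_frames =>
      if flag == 1 then
        pvArun frame_size total_samples min_silence_frames rest (i + 1) segments true
          (if in_speech then start_frame else i) 0
      else if !in_speech then
        pvArun frame_size total_samples min_silence_frames rest (i + 1) segments in_speech
          start_frame silence_frames
      else
        let silence_frames' := silence_frames + 1
        if silence_frames' < min_silence_frames then
          pvArun frame_size total_samples min_silence_frames rest (i + 1) segments in_speech
            start_frame silence_frames'
        else
          let end_frame := i - silence_frames' + 1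
          let segments' :=
            if end_frame > start_frame then
              segments ++ [(start_frame * frame_size, min (end_frame * frame_size) total_samples)]
            else segments
          pvArun frame_size total_samples min_silence_frames rest (i + 1) segments' false
            start_frame 0

def flags_to_segments_py (flags : List Int) (frame_size : Int) (total_samples : Int) (min_silence_frames : Int) : List (Int × Int) :=
  pvArun frame_size total_samples min_silence_frames flags 0 [] false 0 0

-- ===== PORT B =====
-- one step of B's first pass: merge speech index i into the last group or open a new group
def pvGroupStep (threshold : Int) (g : List (Int × Int)) (i : Int) : List (Int × Int) :=
  match g.getLast? with
  | some fl => if i - fl.2 - 1 < threshold then g.dropLast ++ [(fl.1, i)] else g ++ [(i, i)]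
  | none => [(i, i)]

def flags_to_segments_py_alt (flags : List Int) (frame_size : Int) (total_samples : Int) (min_silence_frames : Int) : List (Int × Int) :=
  let threshold := max min_silence_frames 1
  let speech := (PySem.List.enumerate flags).filterMap
    (fun p => if p.2 == 1 then some p.1 else none)
  let groups := speech.foldl (pvGroupStep threshold) []
  (PySem.List.enumerate groups).map (fun p =>
    if p.1 < (groups.length : Int) - 1 ∨ (flags.length : Int) - (p.2.2 + 1) ≥ threshold then
      (p.2.1 * frame_size, min ((p.2.2 + 1) * frame_size) total_samples)
    else (p.2.1 * frame_size, total_samples))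

-- ===== PRECONDITION & SPEC =====
def Spec_flags_to_segments_py (flags : List Int) (frame_size : Int) (total_samples : Int) (min_silence_frames : Int) (out : List (Int × Int)) : Prop := out = flags_to_segments_py_alt flags frame_size total_samples min_silence_frames
instance (flags : List Int) (frame_size : Int) (total_samples : Int) (min_silence_frames : Int) (out : List (Int × Int)) : Decidable (Spec_flags_to_segments_py flags frame_size total_samples min_silence_frames out) := by unfold Spec_flags_to_segments_py; infer_instance

-- ===== CLAIM (what is proved, stated in full; the proofs are below) =====
def Claim_equal_flags_to_segments_py : Prop := ∀ (flags : List Int) (frame_size : Int) (total_samples : Int) (min_silence_frames : Int), Dom_flags_to_segments_py flags frame_size total_samples min_silence_frames → Spec_flags_to_segments_py flags frame_size total_samples min_silence_frames (flags_to_segments_py flags frame_size total_samples min_silence_frames)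

-- ===== LEMMAS AND PROOFS =====

-- proof-only helpers
def pvClamp (frame_size total_samples : Int) (p : Int × Int) : Int × Int :=
  (p.1 * frame_size, min ((p.2 + 1) * frame_size) total_samples)

def pvEmit (frame_size total_samples threshold n : Int) (groups : List (Int × Int)) : List (Int × Int) :=
  (PySem.List.enumerate groups).map (fun p =>
    if p.1 < (groups.length : Int) - 1 ∨ n - (p.2.2 + 1) ≥ threshold then
      (p.2.1 * frame_size, min ((p.2.2 + 1) * frame_size) total_samples)
    else (p.2.1 * frame_size, total_samples))

def pvSpeechI : List Int → Int → List Int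
  | [], _ => []
  | f :: r, i => if f == 1 then i :: pvSpeechI r (i + 1) else pvSpeechI r (i + 1)

lemma pvSpeechI_cons (f : Int) (r : List Int) (i : Int) :
    pvSpeechI (f :: r) i = if f == 1 then i :: pvSpeechI r (i + 1) else pvSpeechI r (i + 1) := rfl

lemma pvSpeech_bridge (fl : List Int) : ∀ s : Int,
    (PySem.List.enumerate fl s).filterMap (fun p => if p.2 == 1 then some p.1 else none)
      = pvSpeechI fl s := by
  induction fl with
  | nil => intro s; simp [pvSpeechI, PySem.List.enumerate_nil]
  | cons f r ih =>
      intro s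
      rw [PySem.List.enumerate_cons, List.filterMap_cons, pvSpeechI_cons]
      cases h : (f == 1) <;> rw [ih (s + 1)] <;> simp

lemma pvEmit_concat (fs tot t n : Int) (g : List (Int × Int)) (fl : Int × Int) :
    pvEmit fs tot t n (g ++ [fl])
      = g.map (pvClamp fs tot)
        ++ [if n - (fl.2 + 1) ≥ t then pvClamp fs tot fl else (fl.1 * fs, tot)] := by
  unfold pvEmit
  rw [PySem.List.enumerate_append, List.map_append]
  congr 1
  · have h1 : ∀ p ∈ PySem.List.enumerate g 0,
        (if p.1 < (((g ++ [fl]).length : Nat) : Int) - 1 ∨ n - (p.2.2 + 1) ≥ t then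
          (p.2.1 * fs, min ((p.2.2 + 1) * fs) tot) else (p.2.1 * fs, tot)) = pvClamp fs tot p.2 := by
      intro p hp
      rcases (PySem.List.mem_enumerate_iff _ _ _).1 hp with ⟨k, hk, rfl⟩
      have hlt : ((0 : Int) + k) < (((g ++ [fl]).length : Nat) : Int) - 1 := by
        simp only [List.length_append, List.length_cons, List.length_nil]
        push_cast
        omega
      rw [if_pos (Or.inl hlt)]
      rfl
    have h2 : (PySem.List.enumerate g 0).map (fun p => pvClamp fs tot p.2)
        = ((PySem.List.enumerate g 0).map (fun p => p.2)).map (pvClamp fs tot) := by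
      rw [List.map_map]
      rfl
    rw [List.map_congr_left h1, h2, PySem.List.map_snd_enumerate]
  · have hnotlt : ¬ ((0 : Int) + (g.length : Int) < (((g ++ [fl]).length : Nat) : Int) - 1) := by
      simp only [List.length_append, List.length_cons, List.length_nil]
      push_cast
      omega
    simp only [PySem.List.enumerate_cons, PySem.List.enumerate_nil, List.map_cons, List.map_nil]
    by_cases hc : n - (fl.2 + 1) ≥ t
    · simp [hc, pvClamp]
    · simp [hc]

-- the simulation invariant between A's loop state and B's group list
def pvInv (fs tot t i start sil : Int) : Bool → List (Int × Int) → List (Int × Int) → Prop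
  | true, segs, g =>
      ∃ gdone l, g = gdone ++ [(start, l)] ∧ segs = gdone.map (pvClamp fs tot)
        ∧ l = i - 1 - sil ∧ start ≤ l ∧ 0 ≤ sil ∧ sil < t
  | false, segs, g =>
      segs = g.map (pvClamp fs tot)
        ∧ (g = [] ∨ ∃ p, g.getLast? = some p ∧ i - p.2 - 1 ≥ t)

lemma pvMain (fs tot ms : Int) :
    ∀ (rest : List Int) (i : Int) (segs : List (Int × Int)) (insp : Bool) (start sil : Int)
      (g : List (Int × Int)),
      pvInv fs tot (max ms 1) i start sil insp segs g →
      pvArun fs tot ms rest i segs insp start sil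
        = pvEmit fs tot (max ms 1) (i + rest.length)
            ((pvSpeechI rest i).foldl (pvGroupStep (max ms 1)) g) := by
  intro rest
  induction rest with
  | nil =>
      intro i segs insp start sil g hinv
      cases insp
      · obtain ⟨hsegs, hlast⟩ := hinv
        simp only [pvArun, pvSpeechI, List.foldl_nil, List.length_nil, Bool.false_eq_true,
          if_false, Nat.cast_zero, add_zero]
        rcases hlast with rfl | ⟨p, hl, hge⟩
        · simp [pvEmit, hsegs, PySem.List.enumerate_nil]
        · rcases List.getLast?_eq_some_iff.1 hl with ⟨q, rfl⟩
          rw [pvEmit_concat, if_pos (by omega)]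
          simp [hsegs, pvClamp]
      · obtain ⟨gdone, l, rfl, hsegs, hl, hstart, hsil0, hsilt⟩ := hinv
        simp only [pvArun, pvSpeechI, List.foldl_nil, List.length_nil, if_true,
          Nat.cast_zero, add_zero]
        rw [pvEmit_concat, if_neg (by omega)]
        simp [hsegs]
  | cons f tail ih =>
      intro i segs insp start sil g hinv
      have ht1 : (1 : Int) ≤ max ms 1 := le_max_right ms 1
      have hn : i + ((f :: tail).length : Int) = (i + 1) + (tail.length : Int) := by
        simp only [List.length_cons]; push_cast; ring
      rw [hn, pvSpeechI_cons]
      by_cases hf : (f == 1) = true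
      · rw [if_pos hf]
        cases insp
        · obtain ⟨hsegs, hlast⟩ := hinv
          simp only [pvArun, hf, if_true, Bool.false_eq_true, if_false, List.foldl_cons]
          rcases hlast with rfl | ⟨p, hl, hge⟩
          · have hstep : pvGroupStep (max ms 1) [] i = [] ++ [(i, i)] := by
              simp [pvGroupStep]
            rw [hstep]
            exact ih (i + 1) segs true i 0 ([] ++ [(i, i)])
              ⟨[], i, rfl, by simpa using hsegs, by ring, le_refl i, le_refl 0, by omega⟩
          · have hstep : pvGroupStep (max ms 1) g i = g ++ [(i, i)] := by
              simp only [pvGroupStep, hl]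
              rw [if_neg (by omega)]
            rw [hstep]
            exact ih (i + 1) segs true i 0 (g ++ [(i, i)])
              ⟨g, i, rfl, hsegs, by ring, le_refl i, le_refl 0, by omega⟩
        · obtain ⟨gdone, l, rfl, hsegs, hl, hstart, hsil0, hsilt⟩ := hinv
          simp only [pvArun, hf, if_true, List.foldl_cons]
          have hstep : pvGroupStep (max ms 1) (gdone ++ [(start, l)]) i
              = gdone ++ [(start, i)] := by
            simp only [pvGroupStep, List.getLast?_concat]
            rw [if_pos (by omega), List.dropLast_concat]
          rw [hstep]
          exact ih (i + 1) segs true start 0 (gdone ++ [(start, i)])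
            ⟨gdone, i, rfl, hsegs, by ring, by omega, le_refl 0, by omega⟩
      · rw [if_neg hf]
        cases insp
        · obtain ⟨hsegs, hlast⟩ := hinv
          simp only [pvArun, hf, Bool.false_eq_true, if_false, Bool.not_false, if_true]
          refine ih (i + 1) segs false start sil g ⟨hsegs, ?_⟩
          rcases hlast with rfl | ⟨p, hl, hge⟩
          · exact Or.inl rfl
          · exact Or.inr ⟨p, hl, by omega⟩
        · obtain ⟨gdone, l, rfl, hsegs, hl, hstart, hsil0, hsilt⟩ := hinv
          simp only [pvArun, hf, if_false, Bool.not_true, Bool.false_eq_true, if_true]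
          by_cases hs : sil + 1 < ms
          · rw [if_pos hs]
            exact ih (i + 1) segs true start (sil + 1) (gdone ++ [(start, l)])
              ⟨gdone, l, rfl, hsegs, by omega, hstart, by omega,
                lt_max_of_lt_left hs⟩
          · rw [if_neg hs]
            have hend : i - (sil + 1) + 1 = l + 1 := by omega
            rw [if_pos (by omega)]
            refine ih (i + 1) _ false start 0 (gdone ++ [(start, l)]) ⟨?_, Or.inr ⟨(start, l),
              List.getLast?_concat, by
                have hmax : max ms 1 ≤ sil + 1 := max_le (by omega) (by omega)
                simp only
                omega⟩⟩
            rw [hend, hsegs]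
            simp [pvClamp]

theorem flags_to_segments_py_spec : Claim_equal_flags_to_segments_py := by
  intro flags frame_size total_samples min_silence_frames _
  unfold Spec_flags_to_segments_py flags_to_segments_py flags_to_segments_py_alt
  rw [pvSpeech_bridge]
  have h := pvMain frame_size total_samples min_silence_frames flags 0 [] false 0 0 []
    ⟨rfl, Or.inl rfl⟩
  rw [zero_add] at h
  rw [h]
  rfl
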